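-- pv_equiv track=rewrite | github.com/pypi-data/pypi-mirror-398 | packages/pg-extended/pg_extended-0.0.1b1-py3-none-any.whl/pg_extended/UI/Elements/TextInput.py | getSplitText
-- ===== SOURCE A (Python) =====
-- LINE_SPLIT_UNICODES = ' \t\u00A0\u2000\u200A\u3000'+',.;:!?\'\"(){}[]/\\|-_\n\r\f\v'
--
-- def getSplitText(text):
--   splitArr = ['']
--
--   for char in text:
--     if char.isspace():
--       if splitArr[-1].isspace():
--         splitArr[-1] += char
--       else:
--         splitArr.append(char)
--     elif char in LINE_SPLIT_UNICODES:
--       splitArr.append(char)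
--     else:
--       if splitArr[-1] and not splitArr[-1].isspace() and splitArr[-1] not in LINE_SPLIT_UNICODES:
--         splitArr[-1] += char
--       else:
--         splitArr.append(char)
--
--   if splitArr[0] == '':
--     splitArr = splitArr[1:]
--
--   return splitArr
-- ===== SOURCE B (Python) =====
-- LINE_SPLIT_UNICODES = ' \t\u00A0\u2000\u200A\u3000'+',.;:!?\'\"(){}[]/\\|-_\n\r\f\v'
--
-- def getSplitText(text):
--   # One pass over run boundaries: each token is sliced out of `text` directly,
--   # never rebuilt char by char, and no accumulated token is ever rescanned.
--   tokens = []
--   i = 0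
--   n = len(text)
--   while i < n:
--     c = text[i]
--     if c.isspace():
--       j = i + 1
--       while j < n and text[j].isspace():
--         j += 1
--       tokens.append(text[i:j])
--     elif c in LINE_SPLIT_UNICODES:
--       j = i + 1
--       tokens.append(c)
--     else:
--       j = i + 1
--       while j < n and not text[j].isspace() and text[j] not in LINE_SPLIT_UNICODES:
--         j += 1
--       tokens.append(text[i:j])
--     i = j
--   return tokens
-- ===== Notes on version B (the rewrite author's own statement) =====
-- stated objective: faster
-- what changed: B scans each space/word run once with an index and slices the token out of the text, instead of A's per-character loop that re-runs isspace/substring tests on the growing last token and rebuilds it by string concatenation.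
import Mathlib
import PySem

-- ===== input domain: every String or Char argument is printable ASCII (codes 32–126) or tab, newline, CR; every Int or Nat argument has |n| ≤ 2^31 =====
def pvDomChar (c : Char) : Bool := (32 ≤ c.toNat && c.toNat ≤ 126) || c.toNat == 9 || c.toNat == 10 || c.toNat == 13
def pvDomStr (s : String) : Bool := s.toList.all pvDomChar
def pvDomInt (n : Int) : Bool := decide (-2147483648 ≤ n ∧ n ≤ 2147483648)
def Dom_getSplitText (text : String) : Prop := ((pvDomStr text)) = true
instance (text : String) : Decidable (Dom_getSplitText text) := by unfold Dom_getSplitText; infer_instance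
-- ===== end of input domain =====

-- B replaces A's per-character rescans of the accumulated last token by slicing out whole
-- space/word runs in one left-to-right pass (objective: faster).

-- ===== PORT A =====
-- LINE_SPLIT_UNICODES = ' \t\u00A0\u2000\u200A\u3000'+',.;:!?\'\"(){}[]/\\|-_\n\r\f\v'
def pvLSU : List Char := (" \t\u00A0\u2000\u200A\u3000,.;:!?'\"(){}[]/\\|-_\n\r\u000C\u000B").toList

-- one iteration of A's `for char in text` loop; the state is splitArr (tokens as char lists)
def pvStepA (arr : List (List Char)) (c : Char) : List (List Char) :=
  let last := PySem.List.pyGetD arr (-1) []  -- splitArr[-1]; splitArr is never empty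
  if PySem.Chars.isspace c then
    if PySem.Chars.strIsspace last then arr.dropLast ++ [last ++ [c]]  -- splitArr[-1] += char
    else arr ++ [[c]]
  else if PySem.Chars.isIn [c] pvLSU then arr ++ [[c]]
  else
    if !last.isEmpty && !PySem.Chars.strIsspace last && !PySem.Chars.isIn last pvLSU then
      arr.dropLast ++ [last ++ [c]]
    else arr ++ [[c]]

def getSplitText (text : String) : List String :=
  let arr := text.toList.foldl pvStepA [[]]
  let arr2 := if PySem.List.pyGetD arr 0 [] = [] then PySem.List.slice arr (some 1) none else arr
  arr2.map String.ofList

-- ===== PORT B =====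
-- text[j] is neither whitespace nor a separator (the word-run condition of B's inner loop)
def pvWordChar (c : Char) : Bool := !PySem.Chars.isspace c && !PySem.Chars.isIn [c] pvLSU

-- B's while loop: each step slices one whole token run off the front (the inner `while j < n …`
-- scans are the takeWhile/dropWhile of the run predicate)
def pvGoB : List Char → List (List Char)
  | [] => []
  | c :: cs =>
    if PySem.Chars.isspace c then
      (c :: cs.takeWhile PySem.Chars.isspace) :: pvGoB (cs.dropWhile PySem.Chars.isspace)
    else if PySem.Chars.isIn [c] pvLSU then
      [c] :: pvGoB cs
    else
      (c :: cs.takeWhile pvWordChar) :: pvGoB (cs.dropWhile pvWordChar)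
termination_by l => l.length
decreasing_by
  · exact Nat.lt_succ_of_le (List.length_dropWhile_le _ _)
  · exact Nat.lt_succ_of_le (Nat.le_refl _)
  · exact Nat.lt_succ_of_le (List.length_dropWhile_le _ _)

def getSplitText_alt (text : String) : List String := (pvGoB text.toList).map String.ofList

-- ===== PRECONDITION & SPEC =====
def Spec_getSplitText (text : String) (out : List String) : Prop := out = getSplitText_alt text
instance (text : String) (out : List String) : Decidable (Spec_getSplitText text out) := by unfold Spec_getSplitText; infer_instance

-- ===== CLAIM (what is proved, stated in full; the proofs are below) =====
def Claim_equal_getSplitText : Prop := ∀ (text : String), Dom_getSplitText text → Spec_getSplitText text (getSplitText text)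

-- ===== LEMMAS AND PROOFS =====

-- the char after a dropped run fails the run predicate
lemma pv_head_drop (p : Char → Bool) (l : List Char) (d : Char) (tl : List Char)
    (h : l.dropWhile p = d :: tl) : p d = false := by
  have h2 : l.dropWhile p ≠ [] := by simp [h]
  have h3 := List.head_dropWhile_not (p := p) (l := l) h2
  have h4 : (l.dropWhile p).head h2 = d := by simp [h]
  rwa [h4] at h3

-- splitArr[-1] of acc ++ [t] is t, so pvStepA acts only on the final token
lemma pv_stepA_concat (acc : List (List Char)) (t : List Char) (c : Char) :
    pvStepA (acc ++ [t]) c =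
      if PySem.Chars.isspace c then
        if PySem.Chars.strIsspace t then acc ++ [t ++ [c]] else (acc ++ [t]) ++ [[c]]
      else if PySem.Chars.isIn [c] pvLSU then (acc ++ [t]) ++ [[c]]
      else
        if !t.isEmpty && !PySem.Chars.strIsspace t && !PySem.Chars.isIn t pvLSU then
          acc ++ [t ++ [c]]
        else (acc ++ [t]) ++ [[c]] := by
  unfold pvStepA
  rw [PySem.List.pyGetD_neg_one_append_singleton, List.dropLast_concat]

-- a nonempty all-space token satisfies Python's str.isspace
lemma pv_strIsspace_of_all (t : List Char) (h : t ≠ []) (ha : t.all PySem.Chars.isspace = true) :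
    PySem.Chars.strIsspace t = true := by
  simp [PySem.Chars.strIsspace, h, ha]

-- a token starting with a non-space char fails str.isspace
lemma pv_strIsspace_cons_false (c : Char) (t : List Char) (h : PySem.Chars.isspace c = false) :
    PySem.Chars.strIsspace (c :: t) = false := by
  simp [PySem.Chars.strIsspace, h]

-- a nonempty token of word chars is not a substring of LINE_SPLIT_UNICODES
lemma pv_word_not_isIn (c : Char) (t : List Char) (hw : pvWordChar c = true) :
    PySem.Chars.isIn (c :: t) pvLSU = false := by
  rw [PySem.Chars.isIn_eq_false_iff]
  intro hinf
  have hc : c ∈ pvLSU := hinf.subset (List.mem_cons_self ..)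
  have : PySem.Chars.isIn [c] pvLSU = true :=
    (PySem.Chars.isIn_iff_infix [c] pvLSU).mpr ((List.singleton_infix_iff c pvLSU).mpr hc)
  simp [pvWordChar, this] at hw

-- A keeps appending to the trailing space token while the input chars stay whitespace
lemma pv_spaceRun (cs : List Char) : ∀ (acc : List (List Char)) (t : List Char), t ≠ [] →
    t.all PySem.Chars.isspace = true →
    List.foldl pvStepA (acc ++ [t]) cs =
      List.foldl pvStepA (acc ++ [t ++ cs.takeWhile PySem.Chars.isspace])
        (cs.dropWhile PySem.Chars.isspace) := by
  induction cs with
  | nil => intro acc t _ _; simp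
  | cons c cs ih =>
    intro acc t ht ha
    by_cases hc : PySem.Chars.isspace c = true
    · rw [List.foldl_cons, pv_stepA_concat, if_pos hc, if_pos (pv_strIsspace_of_all t ht ha)]
      rw [ih acc (t ++ [c]) (by simp) (by simp [List.all_append, ha, hc])]
      simp [hc]
    · rw [Bool.not_eq_true] at hc
      simp [hc]

-- A keeps appending to the trailing word token while the input chars stay word chars
lemma pv_wordRun (cs : List Char) : ∀ (acc : List (List Char)) (c0 : Char) (t : List Char),
    (c0 :: t).all pvWordChar = true →
    List.foldl pvStepA (acc ++ [c0 :: t]) cs =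
      List.foldl pvStepA (acc ++ [c0 :: (t ++ cs.takeWhile pvWordChar)])
        (cs.dropWhile pvWordChar) := by
  induction cs with
  | nil => intro acc c0 t _; simp
  | cons c cs ih =>
    intro acc c0 t ha
    have hw0 : pvWordChar c0 = true := by simp [List.all_cons] at ha; exact ha.1
    by_cases hc : pvWordChar c = true
    · have hcs : PySem.Chars.isspace c = false := by
        simp [pvWordChar] at hc; simpa using hc.1
      have hci : PySem.Chars.isIn [c] pvLSU = false := by
        simp [pvWordChar] at hc; simpa using hc.2
      have hsp0 : PySem.Chars.isspace c0 = false := by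
        simp [pvWordChar] at hw0; simpa using hw0.1
      rw [List.foldl_cons, pv_stepA_concat, if_neg (by simp [hcs]), if_neg (by simp [hci])]
      rw [if_pos (by
        simp [pv_strIsspace_cons_false c0 t hsp0, pv_word_not_isIn c0 t hw0])]
      rw [show acc ++ [c0 :: t ++ [c]] = acc ++ [c0 :: (t ++ [c])] from by simp]
      rw [ih acc c0 (t ++ [c]) (by simp [List.all_cons] at ha ⊢; exact ⟨hw0, fun x hx => ha.2 x hx, hc⟩)]
      simp [hc]
    · rw [Bool.not_eq_true] at hc
      simp [hc]

-- the last token t lets the next char of cs start a fresh token in A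
def pvFresh (t : List Char) (cs : List Char) : Prop :=
  match cs with
  | [] => True
  | c :: _ =>
    if PySem.Chars.isspace c then PySem.Chars.strIsspace t = false
    else if PySem.Chars.isIn [c] pvLSU then True
    else (!t.isEmpty && !PySem.Chars.strIsspace t && !PySem.Chars.isIn t pvLSU) = false

-- main bridge: from any state whose last token is fresh for the remaining input,
-- A's fold appends exactly B's token runs
lemma pv_bridge : ∀ (n : Nat) (cs : List Char), cs.length ≤ n →
    ∀ (acc : List (List Char)) (t : List Char), pvFresh t cs →
    List.foldl pvStepA (acc ++ [t]) cs = (acc ++ [t]) ++ pvGoB cs := by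
  intro n
  induction n with
  | zero =>
    intro cs hlen acc t _
    have : cs = [] := List.eq_nil_of_length_eq_zero (Nat.le_zero.mp hlen)
    subst this; simp [pvGoB]
  | succ n ih =>
    intro cs hlen acc t hf
    match cs with
    | [] => simp [pvGoB]
    | c :: cs' =>
      simp only [List.length_cons, Nat.succ_le_succ_iff] at hlen
      by_cases hc : PySem.Chars.isspace c = true
      · -- whitespace run
        have hfr : PySem.Chars.strIsspace t = false := by
          simpa [pvFresh, hc] using hf
        rw [List.foldl_cons, pv_stepA_concat, if_pos hc, if_neg (by simp [hfr])]
        rw [pv_spaceRun cs' (acc ++ [t]) [c] (by simp) (by simp [hc])]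
        set run := cs'.takeWhile PySem.Chars.isspace with hrun
        set rest := cs'.dropWhile PySem.Chars.isspace with hrest
        have hfr2 : pvFresh (c :: run) rest := by
          cases hrs : rest with
          | nil => trivial
          | cons d tl =>
            have hd : PySem.Chars.isspace d = false :=
              pv_head_drop _ cs' d tl (by rw [hrest] at hrs; exact hrs)
            by_cases hdi : PySem.Chars.isIn [d] pvLSU = true
            · simp [pvFresh, hd, hdi]
            · have hsp : PySem.Chars.strIsspace (c :: run) = true := by
                apply pv_strIsspace_of_all _ (by simp)
                simp only [List.all_cons, hc, Bool.true_and, hrun, List.all_eq_true]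
                intro x hx
                exact List.mem_takeWhile_imp hx
              simp [pvFresh, hd, hdi, hsp]
        have hrl : rest.length ≤ n := le_trans (hrest ▸ List.length_dropWhile_le _ _) hlen
        rw [show (acc ++ [t]) ++ [[c] ++ run] = (acc ++ [t]) ++ [c :: run] by simp]
        rw [ih rest hrl (acc ++ [t]) (c :: run) hfr2]
        rw [show pvGoB (c :: cs') = (c :: run) :: pvGoB rest by rw [pvGoB]; simp [hc, hrun, hrest]]
        simp
      · rw [Bool.not_eq_true] at hc
        by_cases hi : PySem.Chars.isIn [c] pvLSU = true
        · -- separator: a fresh single-char token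
          rw [List.foldl_cons, pv_stepA_concat, if_neg (by simp [hc]), if_pos hi]
          have hfr2 : pvFresh [c] cs' := by
            match cs' with
            | [] => trivial
            | d :: tl =>
              by_cases hd : PySem.Chars.isspace d = true
              · simp [pvFresh, hd, pv_strIsspace_cons_false c [] hc]
              · by_cases hdi : PySem.Chars.isIn [d] pvLSU = true
                · simp [pvFresh, hd, hdi]
                · simp [pvFresh, hd, hdi, hi]
          rw [ih cs' hlen (acc ++ [t]) [c] hfr2]
          rw [show pvGoB (c :: cs') = [c] :: pvGoB cs' by rw [pvGoB]; simp [hc, hi]]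
          simp
        · -- word run
          have hw : pvWordChar c = true := by simp [pvWordChar, hc, hi]
          have hfr0 : (!t.isEmpty && !PySem.Chars.strIsspace t && !PySem.Chars.isIn t pvLSU) = false := by
            simpa [pvFresh, hc, hi] using hf
          rw [List.foldl_cons, pv_stepA_concat, if_neg (by simp [hc]), if_neg (by simp [hi]),
            if_neg (by simp [hfr0])]
          rw [show (acc ++ [t]) ++ [[c]] = (acc ++ [t]) ++ [c :: ([] : List Char)] by simp] 
          rw [pv_wordRun cs' (acc ++ [t]) c [] (by simp [hw])]
          simp only [List.nil_append]
          set run := cs'.takeWhile pvWordChar with hrun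
          set rest := cs'.dropWhile pvWordChar with hrest
          have hfr2 : pvFresh (c :: run) rest := by
            cases hrs : rest with
            | nil => trivial
            | cons d tl =>
              have hd : pvWordChar d = false :=
                pv_head_drop _ cs' d tl (by rw [hrest] at hrs; exact hrs)
              by_cases hds : PySem.Chars.isspace d = true
              · simp [pvFresh, hds, pv_strIsspace_cons_false c run hc]
              · have hdi : PySem.Chars.isIn [d] pvLSU = true := by
                  simp [pvWordChar, hds] at hd; simpa using hd
                simp [pvFresh, hds, hdi]
          have hrl : rest.length ≤ n := le_trans (hrest ▸ List.length_dropWhile_le _ _) hlen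
          rw [ih rest hrl (acc ++ [t]) (c :: run) hfr2]
          rw [show pvGoB (c :: cs') = (c :: run) :: pvGoB rest by
            rw [pvGoB]; simp [hc, hi, hrun, hrest]]
          simp

-- the initial empty token '' is fresh for any input
lemma pv_fresh_nil (cs : List Char) : pvFresh [] cs := by
  match cs with
  | [] => trivial
  | c :: _ =>
    by_cases hc : PySem.Chars.isspace c = true
    · simp [pvFresh, hc, PySem.Chars.strIsspace]
    · by_cases hi : PySem.Chars.isIn [c] pvLSU = true
      · simp [pvFresh, hc, hi]
      · simp [pvFresh, hc, hi]

-- ===== VERDICT (by name: the statement is the Claim_ definition above) =====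
theorem getSplitText_spec : Claim_equal_getSplitText := by
  intro text _
  have h := pv_bridge text.toList.length text.toList (Nat.le_refl _) [] [] (pv_fresh_nil _)
  simp only [List.nil_append] at h
  simp only [Spec_getSplitText, getSplitText, getSplitText_alt, h]
  simp [PySem.List.pyGetD_zero_cons, PySem.List.slice_from_one]
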